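-- pv_equiv track=rewrite | github.com/pypi-data/pypi-mirror-170 | packages/maxar-ard-grid/maxar_ard_grid-1.2.2-py3-none-any.whl/maxar_ard_grid/grid.py | quadkey_to_index
-- ===== SOURCE A (Python) =====
-- def quadkey_to_index(qk):
--     x = 0
--     y = 0
--     for i, digit in enumerate(reversed(qk)):
--         mask = 1 << i
--         if digit == "1":
--             x = x | mask
--         elif digit == "2":
--             y = y | mask
--         elif digit == "3":
--             x = x | mask
--             y = y | mask
--     return x, y, len(qk)
-- ===== SOURCE B (Python) =====
-- def _bits(qk, ones):
--     # project each quadkey digit to one binary digit, then parse the bit-string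
--     if not qk:
--         return 0
--     return int(''.join('1' if c in ones else '0' for c in qk), 2)
--
-- def quadkey_to_index(qk):
--     return _bits(qk, '13'), _bits(qk, '23'), len(qk)
-- ===== Notes on version B (the rewrite author's own statement) =====
-- stated objective: alternative
-- what changed: Replaces A's single reversed loop ORing per-index masks into two accumulators by two staged passes: project the quadkey to an x bit-string and a y bit-string ('1'/'3' resp. '2'/'3' become 1) and parse each with int(_, 2).
import Mathlib
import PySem

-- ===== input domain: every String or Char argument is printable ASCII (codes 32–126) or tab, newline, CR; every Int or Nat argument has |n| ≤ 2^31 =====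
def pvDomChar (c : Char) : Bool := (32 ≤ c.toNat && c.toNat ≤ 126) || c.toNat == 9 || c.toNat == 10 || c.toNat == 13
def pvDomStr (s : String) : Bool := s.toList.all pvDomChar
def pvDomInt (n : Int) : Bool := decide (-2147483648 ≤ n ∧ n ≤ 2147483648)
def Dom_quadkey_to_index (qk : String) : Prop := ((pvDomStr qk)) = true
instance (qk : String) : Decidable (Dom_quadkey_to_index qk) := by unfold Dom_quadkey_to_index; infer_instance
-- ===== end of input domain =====

-- B replaces A's reversed loop ORing per-index masks into two accumulators by two
-- staged passes: project the quadkey to an x bit-string and a y bit-string and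
-- parse each as a binary numeral. Equality of return values is proved for all inputs.

-- ===== PORT A =====
-- Python: for i, digit in enumerate(reversed(qk)): mask = 1 << i; OR mask into x/y.
-- (enumerate indices are ≥ 0, so '.toNat' on the shift amount is exact for 1 << i.)
/-- A's loop body: mask = 1 << i, OR into x/y by digit ('.toNat' exact: i ≥ 0). -/
def pvStepA (s : Int × Int) (p : Int × Char) : Int × Int :=
  let mask : Int := 1 <<< p.1.toNat
  if p.2 = '1' then (PySem.Int.bor s.1 mask, s.2)
  else if p.2 = '2' then (s.1, PySem.Int.bor s.2 mask)
  else if p.2 = '3' then (PySem.Int.bor s.1 mask, PySem.Int.bor s.2 mask)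
  else s

def quadkey_to_index (qk : String) : Int × Int × Int :=
  let s := (PySem.List.enumerate qk.toList.reverse).foldl pvStepA ((0 : Int), (0 : Int))
  (s.1, s.2, PySem.Str.len qk)

-- ===== PORT B =====
-- Python B's _bits: ''.join('1' if c in ones else '0' for c in qk) parsed with
-- int(_, 2); the base-2 parse is ported by hand as the standard MSB-first fold
-- (exact here: every projected character is '0' or '1', and qk = "" is guarded).
def pvBitsHelper (qk : String) (ones : String) : Int :=
  if qk = "" then 0
  else
    let n : Nat := (qk.toList.map (fun c => if c ∈ ones.toList then '1' else '0')).foldl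
        (fun a c => 2 * a + (if c = '1' then 1 else 0)) 0
    (n : Int)

def quadkey_to_index_alt (qk : String) : Int × Int × Int :=
  (pvBitsHelper qk "13", pvBitsHelper qk "23", PySem.Str.len qk)

-- ===== PRECONDITION & SPEC =====
def Spec_quadkey_to_index (qk : String) (out : Int × Int × Int) : Prop := out = quadkey_to_index_alt qk
instance (qk : String) (out : Int × Int × Int) : Decidable (Spec_quadkey_to_index qk out) := by unfold Spec_quadkey_to_index; infer_instance

-- ===== CLAIM (what is proved, stated in full; the proofs are below) =====
def Claim_equal_quadkey_to_index : Prop := ∀ (qk : String), Dom_quadkey_to_index qk → Spec_quadkey_to_index qk (quadkey_to_index qk)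

-- ===== LEMMAS AND PROOFS =====

/-- The bit each digit contributes to x (as a Nat). -/
def pvBX (c : Char) : Nat := if c = '1' then 1 else if c = '3' then 1 else 0
/-- The bit each digit contributes to y (as a Nat). -/
def pvBY (c : Char) : Nat := if c = '2' then 1 else if c = '3' then 1 else 0

/-- The x-value both programs compute, as a big-endian Nat. -/
def pvVX : List Char → Nat
  | [] => 0
  | c :: t => pvBX c * 2 ^ t.length + pvVX t
/-- The y-value both programs compute, as a big-endian Nat. -/
def pvVY : List Char → Nat
  | [] => 0
  | c :: t => pvBY c * 2 ^ t.length + pvVY t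

theorem pvBX_lt (c : Char) : pvBX c < 2 := by unfold pvBX; split_ifs <;> omega
theorem pvBY_lt (c : Char) : pvBY c < 2 := by unfold pvBY; split_ifs <;> omega

theorem pvVX_lt (cs : List Char) : pvVX cs < 2 ^ cs.length := by
  induction cs with
  | nil => simp [pvVX]
  | cons c t ih =>
    have := pvBX_lt c
    simp only [pvVX, List.length_cons, pow_succ]
    nlinarith

theorem pvVY_lt (cs : List Char) : pvVY cs < 2 ^ cs.length := by
  induction cs with
  | nil => simp [pvVY]
  | cons c t ih =>
    have := pvBY_lt c
    simp only [pvVY, List.length_cons, pow_succ]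
    nlinarith

theorem nat_lor_two_pow (n m : Nat) (h : m < 2 ^ n) : m ||| 2 ^ n = m + 2 ^ n := by
  induction n generalizing m with
  | zero => interval_cases m; decide
  | succ n ih =>
    have h2 : m / 2 < 2 ^ n := by omega
    have hrec := ih (m / 2) h2
    have hd : Nat.bit (m % 2 = 1) (m / 2) = m := by
      simp [Nat.bit, Bool.cond_decide]; split <;> omega
    have hp : Nat.bit false (2 ^ n) = 2 ^ (n + 1) := by
      simp [Nat.bit]; ring
    calc m ||| 2 ^ (n + 1)
        = Nat.bit (m % 2 = 1) (m / 2) ||| Nat.bit false (2 ^ n) := by rw [hd, hp]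
      _ = Nat.bit ((decide (m % 2 = 1)) || false) (m / 2 ||| 2 ^ n) := Nat.lor_bit _ _ _ _
      _ = m + 2 ^ (n + 1) := by
          rw [hrec]; simp [Nat.bit, Bool.cond_decide]; split <;> omega

theorem pvStepA_eval (x y : Nat) (n : Nat) (c : Char) (hx : x < 2 ^ n) (hy : y < 2 ^ n) :
    pvStepA ((x : Int), (y : Int)) ((n : Int), c) =
      (((pvBX c * 2 ^ n + x : Nat) : Int), ((pvBY c * 2 ^ n + y : Nat) : Int)) := by
  have hbx : PySem.Int.bor (x : Int) ((2 ^ n : Nat) : Int) = ((x + 2 ^ n : Nat) : Int) := by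
    rw [PySem.Int.bor_natCast, nat_lor_two_pow n x hx]
  have hby : PySem.Int.bor (y : Int) ((2 ^ n : Nat) : Int) = ((y + 2 ^ n : Nat) : Int) := by
    rw [PySem.Int.bor_natCast, nat_lor_two_pow n y hy]
  simp only [pvStepA, Int.toNat_natCast, Nat.one_shiftLeft, hbx, hby]
  unfold pvBX pvBY
  split_ifs <;> simp_all [Prod.ext_iff] <;> push_cast <;> try ring
  all_goals exact ⟨trivial, trivial⟩

/-- A's loop over the enumerated reversed list computes the big-endian values. -/
theorem pvLoopA (cs : List Char) :
    (PySem.List.enumerate cs.reverse).foldl pvStepA ((0 : Int), (0 : Int)) =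
      (((pvVX cs : Nat) : Int), ((pvVY cs : Nat) : Int)) := by
  induction cs with
  | nil => simp [PySem.List.enumerate_nil]
  | cons c t ih =>
    have hrev : (c :: t).reverse = t.reverse ++ [c] := by simp
    have hen : PySem.List.enumerate (t.reverse ++ [c]) =
        PySem.List.enumerate t.reverse ++ [((t.length : Int), c)] := by
      rw [PySem.List.enumerate_append]
      simp [PySem.List.enumerate_cons, PySem.List.enumerate_nil]
    rw [hrev, hen, List.foldl_append, ih]
    simp only [List.foldl_cons, List.foldl_nil]
    rw [pvStepA_eval _ _ _ _ (pvVX_lt t) (pvVY_lt t)]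
    simp [pvVX, pvVY]

/-- B's binary parse of the projected bit-string computes the big-endian value. -/
theorem pvParse (ones : List Char) (f : Char → Nat)
    (hf : ∀ c, (if (if c ∈ ones then '1' else '0') = '1' then 1 else 0) = f c)
    (V : List Char → Nat) (hV0 : V [] = 0)
    (hVc : ∀ c t, V (c :: t) = f c * 2 ^ t.length + V t) :
    ∀ (cs : List Char) (a : Nat),
      (cs.map (fun c => if c ∈ ones then '1' else '0')).foldl
          (fun a c => 2 * a + (if c = '1' then 1 else 0)) a = a * 2 ^ cs.length + V cs := by
  intro cs
  induction cs with
  | nil => intro a; simp [hV0]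
  | cons c t ih =>
    intro a
    simp only [List.map_cons, List.foldl_cons, ih, hf, hVc, List.length_cons, pow_succ]
    ring

theorem pvBits13 (qk : String) : pvBitsHelper qk "13" = ((pvVX qk.toList : Nat) : Int) := by
  unfold pvBitsHelper
  split_ifs with h
  · subst h; simp [pvVX]
  · have := pvParse ("13".toList) pvBX
      (by intro c; unfold pvBX; by_cases h1 : c = '1' <;> by_cases h3 : c = '3' <;>
            simp [h1, h3])
      pvVX rfl (fun c t => rfl) qk.toList 0
    simp only [Nat.zero_mul, Nat.zero_add] at this
    exact congrArg (fun n : Nat => (n : Int)) this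

theorem pvBits23 (qk : String) : pvBitsHelper qk "23" = ((pvVY qk.toList : Nat) : Int) := by
  unfold pvBitsHelper
  split_ifs with h
  · subst h; simp [pvVY]
  · have := pvParse ("23".toList) pvBY
      (by intro c; unfold pvBY; by_cases h2 : c = '2' <;> by_cases h3 : c = '3' <;>
            simp [h2, h3])
      pvVY rfl (fun c t => rfl) qk.toList 0
    simp only [Nat.zero_mul, Nat.zero_add] at this
    exact congrArg (fun n : Nat => (n : Int)) this

-- ===== VERDICT (by name: the statement is the Claim_ definition above) =====
theorem quadkey_to_index_spec : Claim_equal_quadkey_to_index := by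
  intro qk _
  unfold Spec_quadkey_to_index quadkey_to_index quadkey_to_index_alt
  rw [pvLoopA qk.toList, pvBits13, pvBits23]
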